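-- pv_equiv track=rewrite | github.com/mc090/config-recommendation-ml | src/data/enrich_content.py | _count_pipfile_deps
-- ===== SOURCE A (Python) =====
-- def _count_pipfile_deps(text: str) -> int:
--     """Count package entries in the [packages] section of a Pipfile."""
--     in_packages = False
--     count = 0
--     for line in text.splitlines():
--         stripped = line.strip()
--         if stripped.startswith("["):
--             in_packages = stripped.lower() == "[packages]"
--             continue
--         if in_packages and stripped and not stripped.startswith("#"):
--             count += 1
--     return count
-- ===== SOURCE B (Python) =====
-- def _count_pipfile_deps(text: str) -> int:
--     """Count package entries in the [packages] section of a Pipfile."""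
--     # Phase 1: group lines into sections keyed by their (stripped) header line.
--     groups = []
--     header = None
--     body = []
--     for line in text.splitlines():
--         s = line.strip()
--         if s.startswith("["):
--             groups.append((header, body))
--             header = s
--             body = []
--         else:
--             body.append(s)
--     groups.append((header, body))
--     # Phase 2: sum non-empty, non-comment lines of every [packages] section.
--     return sum(
--         1
--         for h, b in groups
--         if h is not None and h.lower() == "[packages]"
--         for s in b
--         if s and not s.startswith("#")
--     )
-- ===== Notes on version B (the rewrite author's own statement) =====
-- stated objective: alternative
-- what changed: Replaced the single stateful flag-loop with a two-phase decomposition: first group the lines into header-keyed sections, then sum the non-empty non-comment lines over the sections whose header names the packages section.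
import Mathlib
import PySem

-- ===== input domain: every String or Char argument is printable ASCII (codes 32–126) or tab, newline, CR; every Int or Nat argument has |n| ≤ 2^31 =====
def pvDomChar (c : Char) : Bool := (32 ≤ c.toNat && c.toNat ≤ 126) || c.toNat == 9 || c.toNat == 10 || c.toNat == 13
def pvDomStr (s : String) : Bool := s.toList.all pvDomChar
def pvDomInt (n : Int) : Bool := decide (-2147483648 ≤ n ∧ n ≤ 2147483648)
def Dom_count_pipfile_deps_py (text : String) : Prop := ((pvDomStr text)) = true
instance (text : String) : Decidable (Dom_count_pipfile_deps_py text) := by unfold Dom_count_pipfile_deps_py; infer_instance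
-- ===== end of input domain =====

-- B replaces A's single stateful flag-loop by a two-phase decomposition (group lines into
-- header-keyed sections, then sum the matching sections' entries); objective: alternative.

-- ===== PORT A =====
-- the for-loop over splitlines with state (in_packages, count), as structural recursion
def pvALoop : List String → Bool → Int → Int
  | [], _, count => count
  | line :: rest, inPackages, count =>
    let stripped := PySem.Str.strip line
    if PySem.Str.startswith stripped "[" then
      pvALoop rest (PySem.Str.lower stripped == "[packages]") count
    else if inPackages && !(stripped == "") && !(PySem.Str.startswith stripped "#") then
      pvALoop rest inPackages (count + 1)
    else
      pvALoop rest inPackages count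

def count_pipfile_deps_py (text : String) : Int :=
  pvALoop (PySem.Str.splitlines text) false 0

-- ===== PORT B =====
-- phase 1: group the (stripped) lines into sections, each keyed by its header line
def pvBGroups : List String → Option String → List String → List (Option String × List String)
  | [], header, body => [(header, body)]
  | line :: rest, header, body =>
    let s := PySem.Str.strip line
    if PySem.Str.startswith s "[" then
      (header, body) :: pvBGroups rest (some s) []
    else
      pvBGroups rest header (body ++ [s])

def pvBActive : Option String → Bool
  | none => false
  | some h => PySem.Str.lower h == "[packages]"

def pvBBodyCount (b : List String) : Int :=
  b.foldl (fun acc s => if !(s == "") && !(PySem.Str.startswith s "#") then acc + 1 else acc) 0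

-- phase 2: sum the entry counts of the sections whose header is "[packages]"
def pvBSum (gs : List (Option String × List String)) : Int :=
  gs.foldl (fun acc g => if pvBActive g.1 then acc + pvBBodyCount g.2 else acc) 0

def count_pipfile_deps_py_alt (text : String) : Int :=
  pvBSum (pvBGroups (PySem.Str.splitlines text) none [])

-- ===== PRECONDITION & SPEC =====
def Spec_count_pipfile_deps_py (text : String) (out : Int) : Prop := out = count_pipfile_deps_py_alt text
instance (text : String) (out : Int) : Decidable (Spec_count_pipfile_deps_py text out) := by unfold Spec_count_pipfile_deps_py; infer_instance

-- ===== CLAIM (what is proved, stated in full; the proofs are below) =====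
def Claim_equal_count_pipfile_deps_py : Prop := ∀ (text : String), Dom_count_pipfile_deps_py text → Spec_count_pipfile_deps_py text (count_pipfile_deps_py text)

-- ===== LEMMAS AND PROOFS =====

-- A's accumulator is linear
theorem pvALoop_acc (ls : List String) (inp : Bool) (c : Int) :
    pvALoop ls inp c = c + pvALoop ls inp 0 := by
  induction ls generalizing inp c with
  | nil => simp [pvALoop]
  | cons l rest ih =>
    simp only [pvALoop]
    split_ifs with h1 h2
    · exact ih _ _
    · rw [ih _ (c + 1), ih _ (0 + 1)]; ring
    · exact ih _ _

theorem pvBSum_acc (gs : List (Option String × List String)) (a : Int) :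
    gs.foldl (fun acc g => if pvBActive g.1 then acc + pvBBodyCount g.2 else acc) a
      = a + pvBSum gs := by
  induction gs generalizing a with
  | nil => simp [pvBSum]
  | cons g rest ih =>
    simp only [pvBSum, List.foldl_cons]
    rw [ih, ih (if pvBActive g.1 then 0 + pvBBodyCount g.2 else 0)]
    split_ifs <;> ring

theorem pvBBodyCount_append_one (b : List String) (s : String) :
    pvBBodyCount (b ++ [s])
      = pvBBodyCount b + (if !(s == "") && !(PySem.Str.startswith s "#") then 1 else 0) := by
  simp only [pvBBodyCount, List.foldl_append, List.foldl_cons, List.foldl_nil]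
  split_ifs <;> ring

-- core invariant relating the grouped pass to A's one-pass loop
theorem pvB_eq_pvA (ls : List String) (h : Option String) (body : List String) :
    pvBSum (pvBGroups ls h body)
      = (if pvBActive h then pvBBodyCount body else 0) + pvALoop ls (pvBActive h) 0 := by
  induction ls generalizing h body with
  | nil =>
    simp only [pvBGroups, pvBSum, pvALoop, List.foldl_cons, List.foldl_nil]
    split_ifs <;> simp
  | cons l rest ih =>
    simp only [pvBGroups, pvALoop]
    by_cases h1 : PySem.Str.startswith (PySem.Str.strip l) "[" = true
    · -- header line: flush the current group
      simp only [h1, if_true]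
      simp only [pvBSum, List.foldl_cons]
      rw [pvBSum_acc, ih (some (PySem.Str.strip l)) []]
      have hz : pvBBodyCount ([] : List String) = 0 := rfl
      simp only [hz]
      split_ifs <;> simp [pvBActive]
    · -- ordinary line: appended to the current body
      simp only [if_neg h1]
      rw [ih h (body ++ [PySem.Str.strip l]), pvBBodyCount_append_one]
      by_cases ha : pvBActive h = true
      · simp only [ha, if_true, Bool.true_and]
        by_cases hc : (!(PySem.Str.strip l == "") && !(PySem.Str.startswith (PySem.Str.strip l) "#")) = true
        · simp only [hc, if_true, pvALoop_acc rest true (0 + 1)]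
          ring
        · simp only [hc, Bool.false_eq_true, if_false]
          ring
      · simp only [ha, Bool.false_and, Bool.false_eq_true, if_false]

-- ===== VERDICT (by name: the statement is the Claim_ definition above) =====
theorem count_pipfile_deps_py_spec : Claim_equal_count_pipfile_deps_py := by
  intro text _
  unfold Spec_count_pipfile_deps_py count_pipfile_deps_py count_pipfile_deps_py_alt
  rw [pvB_eq_pvA]
  simp [pvBActive]
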